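-- pv_equiv track=rewrite | github.com/VivaRado/Advent | _/VRD_Typography_Library/Lib/similarity_extractor/simex_plist_comp.py | deal_l
-- ===== SOURCE A (Python) =====
-- def deal_l (g_l, c_s_l, k, g_u, seen_all, seen_k_l):
-- 	#
-- 	for z in c_s_l:
-- 		#
-- 		do_add_l = []
-- 		#
-- 		for seen_l in k[1]:
-- 			#
-- 			lx = list(seen_l)
-- 			#
-- 			if z == lx[0]:
-- 				#
-- 				do_add_l.append(lx[1])
-- 				#
-- 				seen_k_l.append(lx[0])
-- 				seen_k_l.append(lx[1])
-- 				#
-- 				seen_all.append(lx[0])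
-- 				seen_all.append(lx[1])
-- 				#
-- 			#
-- 		g_l[z] = do_add_l#.sort()
--
-- 	return g_l, g_u, seen_all, seen_k_l
-- ===== SOURCE B (Python) =====
-- def deal_l(g_l, c_s_l, k, g_u, seen_all, seen_k_l):
--     # Build the grouping index once: first element -> list of second elements.
--     groups = {}
--     for a, b in k[1]:
--         groups.setdefault(a, []).append(b)
--     # Single pass over c_s_l using the index.
--     for z in c_s_l:
--         matches = groups.get(z, [])
--         g_l[z] = list(matches)
--         for b in matches:
--             seen_k_l.append(z)
--             seen_k_l.append(b)
--             seen_all.append(z)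
--             seen_all.append(b)
--     return g_l, g_u, seen_all, seen_k_l
-- ===== Notes on version B (the rewrite author's own statement) =====
-- stated objective: faster
-- what changed: B precomputes a dict grouping k[1] pairs by first element once, then does a single pass over c_s_l with O(1) lookups instead of rescanning k[1] for every z.
import Mathlib
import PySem

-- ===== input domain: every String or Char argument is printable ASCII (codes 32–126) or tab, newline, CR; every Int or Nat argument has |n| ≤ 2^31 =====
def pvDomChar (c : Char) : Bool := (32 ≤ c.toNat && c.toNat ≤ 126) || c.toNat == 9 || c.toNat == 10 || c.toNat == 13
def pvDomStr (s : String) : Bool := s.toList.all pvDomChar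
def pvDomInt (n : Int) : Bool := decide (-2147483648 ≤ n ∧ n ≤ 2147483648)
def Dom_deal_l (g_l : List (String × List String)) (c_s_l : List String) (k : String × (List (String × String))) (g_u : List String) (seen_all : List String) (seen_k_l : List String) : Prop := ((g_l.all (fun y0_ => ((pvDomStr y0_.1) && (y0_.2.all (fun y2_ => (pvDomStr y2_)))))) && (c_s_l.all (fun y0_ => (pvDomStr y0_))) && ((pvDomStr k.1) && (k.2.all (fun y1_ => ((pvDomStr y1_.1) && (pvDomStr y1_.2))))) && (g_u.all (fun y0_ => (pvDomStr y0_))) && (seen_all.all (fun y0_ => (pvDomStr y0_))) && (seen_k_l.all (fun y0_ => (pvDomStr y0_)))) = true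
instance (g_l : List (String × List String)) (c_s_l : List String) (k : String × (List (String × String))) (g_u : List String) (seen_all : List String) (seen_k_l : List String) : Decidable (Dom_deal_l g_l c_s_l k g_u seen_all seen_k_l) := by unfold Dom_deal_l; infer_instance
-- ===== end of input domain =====

-- B replaces A's rescan of k[1] per element of c_s_l by a dict grouping k[1] by first
-- element built once; return-value equivalence only (A mutates g_l/seen_all/seen_k_l in place, B does too).

-- ===== PORT A =====
def deal_l (g_l : List (String × List String)) (c_s_l : List String) (k : String × (List (String × String))) (g_u : List String) (seen_all : List String) (seen_k_l : List String) : (List (String × List String)) × List String × List String × List String :=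
  -- for z in c_s_l: inner scan of k[1]; g_l[z] = do_add_l; appends to seen_k_l / seen_all
  let r := c_s_l.foldl (fun (st : PySem.Dict String (List String) × List String × List String) z =>
    let inner := k.2.foldl (fun (s : List String × List String × List String) seen_l =>
      -- lx = list(seen_l); if z == lx[0]: append lx[1]; seen_k_l += [lx[0], lx[1]]; seen_all += [lx[0], lx[1]]
      if z == seen_l.1 then
        (s.1 ++ [seen_l.2], s.2.1 ++ [seen_l.1, seen_l.2], s.2.2 ++ [seen_l.1, seen_l.2])
      else s) ([], st.2.1, st.2.2)
    (st.1.insert z inner.1, inner.2.1, inner.2.2)) (PySem.Dict.mk g_l, seen_all, seen_k_l)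
  (r.1.items, g_u, r.2.1, r.2.2)


-- ===== PORT B =====
def deal_l_alt (g_l : List (String × List String)) (c_s_l : List String) (k : String × (List (String × String))) (g_u : List String) (seen_all : List String) (seen_k_l : List String) : (List (String × List String)) × List String × List String × List String :=
  -- groups = {}; for a, b in k[1]: groups.setdefault(a, []).append(b)
  let groups : PySem.Dict String (List String) :=
    k.2.foldl (fun d p => d.modify p.1 [] (· ++ [p.2])) PySem.Dict.empty
  -- for z in c_s_l: ms = groups.get(z, []); g_l[z] = ms; seen lists += interleaved pairs
  let r := c_s_l.foldl (fun (st : PySem.Dict String (List String) × List String × List String) z =>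
    let ms := groups.getD z []
    (st.1.insert z ms,
     st.2.1 ++ ms.flatMap (fun b => [z, b]),
     st.2.2 ++ ms.flatMap (fun b => [z, b]))) (PySem.Dict.mk g_l, seen_all, seen_k_l)
  (r.1.items, g_u, r.2.1, r.2.2)


-- ===== PRECONDITION & SPEC =====
def Spec_deal_l (g_l : List (String × List String)) (c_s_l : List String) (k : String × (List (String × String))) (g_u : List String) (seen_all : List String) (seen_k_l : List String) (out : (List (String × List String)) × List String × List String × List String) : Prop := out = deal_l_alt g_l c_s_l k g_u seen_all seen_k_l
instance (g_l : List (String × List String)) (c_s_l : List String) (k : String × (List (String × String))) (g_u : List String) (seen_all : List String) (seen_k_l : List String) (out : (List (String × List String)) × List String × List String × List String) : Decidable (Spec_deal_l g_l c_s_l k g_u seen_all seen_k_l out) := by unfold Spec_deal_l; infer_instance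

-- ===== CLAIM (what is proved, stated in full; the proofs are below) =====
def Claim_equal_deal_l : Prop := ∀ (g_l : List (String × List String)) (c_s_l : List String) (k : String × (List (String × String))) (g_u : List String) (seen_all : List String) (seen_k_l : List String), Dom_deal_l g_l c_s_l k g_u seen_all seen_k_l → Spec_deal_l g_l c_s_l k g_u seen_all seen_k_l (deal_l g_l c_s_l k g_u seen_all seen_k_l)

-- ===== LEMMAS AND PROOFS =====

-- A's inner scan over l, generalized over the accumulators: it appends the matching
-- second elements to acc and the interleaved pairs to both seen lists.
theorem inner_eq (z : String) (l : List (String × String)) (acc sa sk : List String) :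
    l.foldl (fun (s : List String × List String × List String) seen_l =>
      if z == seen_l.1 then
        (s.1 ++ [seen_l.2], s.2.1 ++ [seen_l.1, seen_l.2], s.2.2 ++ [seen_l.1, seen_l.2])
      else s) (acc, sa, sk)
    = (acc ++ (l.filter (fun p => p.1 == z)).map (·.2),
       sa ++ ((l.filter (fun p => p.1 == z)).map (·.2)).flatMap (fun b => [z, b]),
       sk ++ ((l.filter (fun p => p.1 == z)).map (·.2)).flatMap (fun b => [z, b])) := by
  induction l generalizing acc sa sk with
  | nil => simp
  | cons p t ih =>
    rw [List.foldl_cons]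
    by_cases h : (z == p.1) = true
    · rw [if_pos h, ih]
      have h' : p.1 = z := (beq_iff_eq.mp h).symm
      simp [h']
    · rw [if_neg h, ih]
      have h' : ¬ p.1 = z := fun e => h (by simp [e])
      simp [h']

-- The two outer step functions agree on every state (let-free formulation).
theorem step_eq (k : String × (List (String × String)))
    (st : PySem.Dict String (List String) × List String × List String) (z : String) :
    (st.1.insert z (k.2.foldl (fun (s : List String × List String × List String) seen_l =>
        if z == seen_l.1 then
          (s.1 ++ [seen_l.2], s.2.1 ++ [seen_l.1, seen_l.2], s.2.2 ++ [seen_l.1, seen_l.2])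
        else s) ([], st.2.1, st.2.2)).1,
     (k.2.foldl (fun (s : List String × List String × List String) seen_l =>
        if z == seen_l.1 then
          (s.1 ++ [seen_l.2], s.2.1 ++ [seen_l.1, seen_l.2], s.2.2 ++ [seen_l.1, seen_l.2])
        else s) ([], st.2.1, st.2.2)).2.1,
     (k.2.foldl (fun (s : List String × List String × List String) seen_l =>
        if z == seen_l.1 then
          (s.1 ++ [seen_l.2], s.2.1 ++ [seen_l.1, seen_l.2], s.2.2 ++ [seen_l.1, seen_l.2])
        else s) ([], st.2.1, st.2.2)).2.2)
    = (st.1.insert z ((k.2.foldl (fun d p => d.modify p.1 [] (· ++ [p.2])) PySem.Dict.empty).getD z []),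
       st.2.1 ++ ((k.2.foldl (fun d p => d.modify p.1 [] (· ++ [p.2])) PySem.Dict.empty).getD z []).flatMap (fun b => [z, b]),
       st.2.2 ++ ((k.2.foldl (fun d p => d.modify p.1 [] (· ++ [p.2])) PySem.Dict.empty).getD z []).flatMap (fun b => [z, b])) := by
  have hg : (k.2.foldl (fun d p => d.modify p.1 [] (· ++ [p.2])) PySem.Dict.empty).getD z []
      = (k.2.filter (fun p => p.1 == z)).map (·.2) := by
    simpa using PySem.Dict.getD_foldl_modify_append (l := k.2) (d := PySem.Dict.empty) (c := z)
  rw [inner_eq z k.2 [] st.2.1 st.2.2, hg]; simp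

-- The two outer folds agree from any initial state.
theorem fold_eq (k : String × (List (String × String))) (t : List String)
    (init : PySem.Dict String (List String) × List String × List String) :
    t.foldl (fun (st : PySem.Dict String (List String) × List String × List String) z =>
      (st.1.insert z (k.2.foldl (fun (s : List String × List String × List String) seen_l =>
          if z == seen_l.1 then
            (s.1 ++ [seen_l.2], s.2.1 ++ [seen_l.1, seen_l.2], s.2.2 ++ [seen_l.1, seen_l.2])
          else s) ([], st.2.1, st.2.2)).1,
       (k.2.foldl (fun (s : List String × List String × List String) seen_l =>
          if z == seen_l.1 then
            (s.1 ++ [seen_l.2], s.2.1 ++ [seen_l.1, seen_l.2], s.2.2 ++ [seen_l.1, seen_l.2])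
          else s) ([], st.2.1, st.2.2)).2.1,
       (k.2.foldl (fun (s : List String × List String × List String) seen_l =>
          if z == seen_l.1 then
            (s.1 ++ [seen_l.2], s.2.1 ++ [seen_l.1, seen_l.2], s.2.2 ++ [seen_l.1, seen_l.2])
          else s) ([], st.2.1, st.2.2)).2.2)) init
    = t.foldl (fun (st : PySem.Dict String (List String) × List String × List String) z =>
      (st.1.insert z ((k.2.foldl (fun d p => d.modify p.1 [] (· ++ [p.2])) PySem.Dict.empty).getD z []),
       st.2.1 ++ ((k.2.foldl (fun d p => d.modify p.1 [] (· ++ [p.2])) PySem.Dict.empty).getD z []).flatMap (fun b => [z, b]),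
       st.2.2 ++ ((k.2.foldl (fun d p => d.modify p.1 [] (· ++ [p.2])) PySem.Dict.empty).getD z []).flatMap (fun b => [z, b]))) init := by
  induction t generalizing init with
  | nil => rfl
  | cons z t ih => rw [List.foldl_cons, List.foldl_cons, step_eq k init z]; exact ih _

-- ===== VERDICT (by name: the statement is the Claim_ definition above) =====
theorem deal_l_spec : Claim_equal_deal_l := by
  intro g_l c_s_l k g_u seen_all seen_k_l _
  unfold Spec_deal_l deal_l deal_l_alt
  exact congrArg (fun r : PySem.Dict String (List String) × List String × List String =>
    (r.1.items, g_u, r.2.1, r.2.2)) (fold_eq k c_s_l (PySem.Dict.mk g_l, seen_all, seen_k_l))
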